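-- pv_equiv track=rewrite | github.com/zisekongling/BAAHmanger | update.py | find_update_asset
-- ===== SOURCE A (Python) =====
-- CONFIG = {
--     "gitee_owner": "zisekongling",          # Gitee仓库所有者
--     "gitee_repo": "baah-statistics",        # 仓库名称
--     "version_file": "version.txt",          # 本地版本文件
--     "update_zip": "update.zip",             # 更新包文件名
--     "update_json": "update.json",           # 更新配置文件
--     "temp_dir": "_update_temp",             # 临时目录
--     "backup_dir": "_backup",                # 备份目录
--     "new_update_exe": "newupdate.exe",      # 新的更新程序文件名
--     "self_update_bat": "self_update.bat",   # 自更新批处理文件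
--     "api_timeout": 30,                      # API请求超时(秒)
--     "max_retry": 3,                         # 最大重试次数
--     "max_release_check": 5,                 # 最多检查多少个release
-- }
--
-- def find_update_asset(assets):
--     """在release附件中查找更新包"""
--     # 优先查找 update.zip
--     for asset in assets:
--         if asset.get('name') == CONFIG["update_zip"]:
--             return asset
--
--     # 如果没找到 update.zip，查找第一个zip文件
--     for asset in assets:
--         if asset.get('name', '').lower().endswith('.zip'):
--             return asset
--
--     # 查找第一个文件
--     if assets:
--         return assets[0]
--
--     return None
-- ===== SOURCE B (Python) =====
-- CONFIG = {
--     "update_zip": "update.zip",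
-- }
--
-- def find_update_asset(assets):
--     """One pass: return update.zip immediately, remember the first .zip, fall back to assets[0]."""
--     first_zip = None
--     for asset in assets:
--         if asset.get('name') == CONFIG["update_zip"]:
--             return asset
--         if first_zip is None and asset.get('name', '').lower().endswith('.zip'):
--             first_zip = asset
--     if first_zip is not None:
--         return first_zip
--     return assets[0] if assets else None
-- ===== Notes on version B (the rewrite author's own statement) =====
-- stated objective: alternative
-- what changed: Replaces A's two sequential scans (exact-name pass, then zip-suffix pass) with a single pass that returns the exact match immediately while maintaining a first-zip accumulator, falling back to assets[0].
import Mathlib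
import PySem

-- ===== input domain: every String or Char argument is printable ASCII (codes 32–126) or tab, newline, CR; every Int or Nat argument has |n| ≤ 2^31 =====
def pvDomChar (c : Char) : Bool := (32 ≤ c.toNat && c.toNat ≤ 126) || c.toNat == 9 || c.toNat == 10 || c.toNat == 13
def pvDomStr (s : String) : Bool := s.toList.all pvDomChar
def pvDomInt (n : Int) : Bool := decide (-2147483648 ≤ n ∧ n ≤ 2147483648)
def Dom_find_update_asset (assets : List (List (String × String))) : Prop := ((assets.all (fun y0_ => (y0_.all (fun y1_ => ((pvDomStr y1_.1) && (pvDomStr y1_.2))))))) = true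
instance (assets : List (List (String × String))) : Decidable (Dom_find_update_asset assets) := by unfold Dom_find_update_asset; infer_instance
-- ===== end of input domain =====

-- B is a genuinely different decomposition (one pass with a first-zip accumulator instead of
-- A's two sequential scans); same cost, proved equal on all inputs.

-- ===== PORT A =====
-- asset.get('name') == "update.zip"
def pvIsExact (a : List (String × String)) : Bool :=
  PySem.Dict.get? (PySem.Dict.mk a) "name" == some "update.zip"

-- asset.get('name', '').lower().endswith('.zip')
def pvIsZip (a : List (String × String)) : Bool :=
  PySem.Str.endswith (PySem.Str.lower (PySem.Dict.getD (PySem.Dict.mk a) "name" "")) ".zip"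

def find_update_asset (assets : List (List (String × String))) : Option (List (String × String)) :=
  -- first loop: return first asset with name == "update.zip"
  match assets.find? pvIsExact with
  | some a => some a
  | none =>
    -- second loop: return first asset whose name lowercased ends with ".zip"
    match assets.find? pvIsZip with
    | some a => some a
    | none => assets.head?   -- assets[0] if assets else None

-- ===== PORT B =====
-- single pass carrying the first_zip accumulator
def pvLoopB (firstZip : Option (List (String × String))) :
    List (List (String × String)) → Option (List (String × String))
  | [] => firstZip
  | a :: rest =>
    if pvIsExact a then some a
    else if firstZip.isNone && pvIsZip a then pvLoopB (some a) rest
    else pvLoopB firstZip rest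

def find_update_asset_alt (assets : List (List (String × String))) : Option (List (String × String)) :=
  match pvLoopB none assets with
  | some a => some a
  | none => assets.head?

-- ===== PRECONDITION & SPEC =====
def Spec_find_update_asset (assets : List (List (String × String))) (out : Option (List (String × String))) : Prop := out = find_update_asset_alt assets
instance (assets : List (List (String × String))) (out : Option (List (String × String))) : Decidable (Spec_find_update_asset assets out) := by unfold Spec_find_update_asset; infer_instance

-- ===== CLAIM (what is proved, stated in full; the proofs are below) =====
def Claim_equal_find_update_asset : Prop := ∀ (assets : List (List (String × String))), Dom_find_update_asset assets → Spec_find_update_asset assets (find_update_asset assets)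

-- ===== LEMMAS AND PROOFS =====

-- with the accumulator already set, only the exact-match pass can override it
lemma pvLoopB_some (z : List (String × String)) :
    ∀ xs, pvLoopB (some z) xs =
      match xs.find? pvIsExact with
      | some a => some a
      | none => some z := by
  intro xs
  induction xs with
  | nil => rfl
  | cons a rest ih =>
    simp only [pvLoopB, List.find?]
    by_cases h : pvIsExact a
    · simp [h]
    · simp [h, ih]

-- the one-pass loop with empty accumulator computes A's two scans
lemma pvLoopB_none :
    ∀ xs, pvLoopB none xs =
      match xs.find? pvIsExact with
      | some a => some a
      | none => xs.find? pvIsZip := by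
  intro xs
  induction xs with
  | nil => rfl
  | cons a rest ih =>
    simp only [pvLoopB, List.find?]
    by_cases h : pvIsExact a
    · simp [h]
    · by_cases hz : pvIsZip a
      · simp [h, hz, pvLoopB_some]
      · simp [h, hz, ih]

-- ===== VERDICT (by name: the statement is the Claim_ definition above) =====
theorem find_update_asset_spec : Claim_equal_find_update_asset := by
  intro assets _
  unfold Spec_find_update_asset find_update_asset find_update_asset_alt
  rw [pvLoopB_none]
  cases h1 : assets.find? pvIsExact with
  | some a => rfl
  | none => cases h2 : assets.find? pvIsZip with
    | some a => rfl
    | none => rfl
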